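-- pv_equiv track=rewrite | github.com/Shack-de-Shnaek/bus_system | server/main/models.py | encode_str
-- ===== SOURCE A (Python) =====
-- def encode_str(string):
--     out = ""
--
--     for c in string:
--         code = ord(c)
--         char = ""
--         if code >= 48 and code <= 57:
--             char += str(code - 48)
--         elif code >= 65 and code <= 90:
--             char += str(code - 65 + 10)
--         elif code >= 97 and code <= 122:
--             char += str(code - 97 + 10 + 26)
--         else:
--             raise ValueError(f"Invalid character '{c}' in string. Only alphanumeric characters are allowed.")
--
--         if len(char) == 1:
--             char = "0" + char
--
--         out += char
--
--     return out
-- ===== SOURCE B (Python) =====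
-- ALPHABET = "0123456789ABCDEFGHIJKLMNOPQRSTUVWXYZabcdefghijklmnopqrstuvwxyz"
--
-- def encode_str(string):
--     parts = []
--     for c in string:
--         v = ALPHABET.find(c)
--         if v < 0:
--             raise ValueError(f"Invalid character '{c}' in string. Only alphanumeric characters are allowed.")
--         parts.append(f"{v:02d}")
--     return "".join(parts)
-- ===== Notes on version B (the rewrite author's own statement) =====
-- stated objective: idiomatic
-- what changed: Replaces the three arithmetic range-branches per character with a single 62-char alphabet table lookup (ALPHABET.find) plus zero-padded formatting, collecting parts and joining instead of repeated string concatenation.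
import Mathlib
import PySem

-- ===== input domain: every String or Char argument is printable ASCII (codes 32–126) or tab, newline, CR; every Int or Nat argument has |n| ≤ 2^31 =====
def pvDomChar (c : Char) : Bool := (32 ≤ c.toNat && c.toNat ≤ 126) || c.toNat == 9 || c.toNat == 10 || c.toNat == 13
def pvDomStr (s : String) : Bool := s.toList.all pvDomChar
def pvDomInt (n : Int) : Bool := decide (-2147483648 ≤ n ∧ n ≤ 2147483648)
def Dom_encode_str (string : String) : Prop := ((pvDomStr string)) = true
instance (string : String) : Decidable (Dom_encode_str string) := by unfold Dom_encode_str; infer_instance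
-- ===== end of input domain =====

-- B replaces A's per-character arithmetic branch cascade by a single alphabet-table lookup
-- with zero-padded formatting, joining collected parts (idiomatic; same O(n) cost).
-- A raises ValueError on any non-alphanumeric character; Pre_ excludes exactly those inputs.

-- ===== PORT A =====
-- A's per-character branch cascade; none = the ValueError raise.
def pvCharA (c : Char) : Option String :=
  let code : Int := c.toNat
  if 48 ≤ code ∧ code ≤ 57 then
    let char := PySem.Int.toStr (code - 48)
    some (if char.length = 1 then "0" ++ char else char)
  else if 65 ≤ code ∧ code ≤ 90 then
    let char := PySem.Int.toStr (code - 65 + 10)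
    some (if char.length = 1 then "0" ++ char else char)
  else if 97 ≤ code ∧ code ≤ 122 then
    let char := PySem.Int.toStr (code - 97 + 10 + 26)
    some (if char.length = 1 then "0" ++ char else char)
  else none

def pvStepA (acc : Option String) (c : Char) : Option String :=
  acc.bind (fun out => (pvCharA c).map (fun char => out ++ char))

def encode_str (string : String) : String :=
  (string.toList.foldl pvStepA (some "")).getD ""

-- ===== PORT B =====
def pvALPHABET : String := "0123456789ABCDEFGHIJKLMNOPQRSTUVWXYZabcdefghijklmnopqrstuvwxyz"

-- hand port of f"{v:02d}": exact for 0 ≤ v ≤ 99 (the only values B formats)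
def pvFmt02 (v : Int) : String :=
  let s := PySem.Int.toStr v
  if s.length = 1 then "0" ++ s else s

def pvStepB (acc : Option (List String)) (c : Char) : Option (List String) :=
  acc.bind (fun parts =>
    let v := PySem.Str.find pvALPHABET (String.singleton c)
    if v < 0 then none else some (parts ++ [pvFmt02 v]))

def encode_str_alt (string : String) : String :=
  match string.toList.foldl pvStepB (some []) with
  | some parts => PySem.Str.join "" parts
  | none => ""

-- ===== PRECONDITION & SPEC =====
def pvIsAlnum (c : Char) : Bool :=
  (48 ≤ c.toNat && c.toNat ≤ 57) || (65 ≤ c.toNat && c.toNat ≤ 90) || (97 ≤ c.toNat && c.toNat ≤ 122)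

-- A raises ValueError on any non-alphanumeric character; Pre_ admits exactly alphanumeric strings.
def Pre_encode_str (string : String) : Prop := string.toList.all pvIsAlnum = true
instance (string : String) : Decidable (Pre_encode_str string) := by unfold Pre_encode_str; infer_instance

def pvWitness_encode_str : String := "Bus42z"

def Spec_encode_str (string : String) (out : String) : Prop := out = encode_str_alt string
instance (string : String) (out : String) : Decidable (Spec_encode_str string out) := by unfold Spec_encode_str; infer_instance

-- ===== CLAIM (what is proved, stated in full; the proofs are below) =====
def Claim_equal_encode_str : Prop := ∀ (string : String), Dom_encode_str string → Pre_encode_str string → Spec_encode_str string (encode_str string)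

-- ===== LEMMAS AND PROOFS =====

-- per-character agreement: on an alphanumeric char, A's branch cascade produces exactly
-- B's table code, and B's find succeeds
set_option maxRecDepth 4000 in
theorem pvChar_agree : ∀ c : Char, pvIsAlnum c = true →
    pvCharA c = some (pvFmt02 (PySem.Str.find pvALPHABET (String.singleton c))) ∧
    ¬ PySem.Str.find pvALPHABET (String.singleton c) < 0 := by
  intro c hc
  have hlt : c.toNat < 123 := by
    have h2 := hc
    unfold pvIsAlnum at h2
    simp only [Bool.or_eq_true, Bool.and_eq_true, decide_eq_true_eq] at h2
    omega
  have hrep : Char.ofNat c.toNat = c := Char.ofNat_toNat c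
  have key : ∀ n : Nat, n < 123 → pvIsAlnum (Char.ofNat n) = true →
      pvCharA (Char.ofNat n) = some (pvFmt02 (PySem.Str.find pvALPHABET (String.singleton (Char.ofNat n)))) ∧
      ¬ PySem.Str.find pvALPHABET (String.singleton (Char.ofNat n)) < 0 := by decide
  have := key c.toNat hlt (by rw [hrep]; exact hc)
  rwa [hrep] at this

theorem pvIntercalate_nil_append (L : List (List Char)) (t : List Char) :
    List.intercalate [] (L ++ [t]) = List.intercalate [] L ++ t := by
  induction L with
  | nil => simp [List.intercalate]
  | cons x xs ih => cases xs <;> simp_all [List.intercalate, List.intersperse]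

theorem pvJoin_append (parts : List String) (s : String) :
    PySem.Str.join "" (parts ++ [s]) = PySem.Str.join "" parts ++ s := by
  simp only [PySem.Str.join, PySem.Chars.join, List.map_append, List.map_cons, List.map_nil]
  rw [show ("".toList : List Char) = [] from rfl, pvIntercalate_nil_append]
  simp

theorem pvFold_agree : ∀ (l : List Char), l.all pvIsAlnum = true →
    ∀ parts : List String,
      l.foldl pvStepA (some (PySem.Str.join "" parts)) =
        (l.foldl pvStepB (some parts)).map (PySem.Str.join "") := by
  intro l
  induction l with
  | nil => intro _ parts; simp
  | cons c cs ih =>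
    intro h parts
    simp only [List.all_cons, Bool.and_eq_true] at h
    obtain ⟨hA, hfind⟩ := pvChar_agree c h.1
    simp only [List.foldl_cons, pvStepA, pvStepB, hA, if_neg hfind, Option.bind_some,
      Option.map_some]
    rw [← pvJoin_append]
    exact ih h.2 _

-- ===== VERDICT (by name: the statement is the Claim_ definition above) =====
theorem encode_str_spec : Claim_equal_encode_str := by
  intro s _ hpre
  unfold Spec_encode_str encode_str encode_str_alt
  have h := pvFold_agree s.toList hpre []
  rw [show PySem.Str.join "" ([] : List String) = "" from rfl] at h
  rw [h]
  cases s.toList.foldl pvStepB (some []) with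
  | none => simp
  | some parts => simp
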